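-- pv_equiv track=rewrite | github.com/sarahkittyy/Functional2 | interpreter/strip.py | ismath
-- ===== SOURCE A (Python) =====
-- def ismath(value):
-- 	depth = 0
-- 	for char in value:
-- 		if char == '{':
-- 			depth += 1
-- 		elif char == '}':
-- 			depth -= 1
--
-- 		if depth == 0 and char in '+-*/%&':
-- 			return True
-- 	return False
-- ===== SOURCE B (Python) =====
-- def ismath(value):
--     # stateless: an operator is at top level iff the braces before it are balanced
--     return any(value.count('{', 0, i) == value.count('}', 0, i)
--                for i, c in enumerate(value) if c in '+-*/%&')
-- ===== Notes on version B (the rewrite author's own statement) =====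
-- stated objective: alternative
-- what changed: B drops A's running mutable depth counter entirely: for each operator position it independently tests top-levelness by comparing str.count of the open and close braces over the prefix, an existence test over per-position stateless counts instead of a single stateful scan.
import Mathlib
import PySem

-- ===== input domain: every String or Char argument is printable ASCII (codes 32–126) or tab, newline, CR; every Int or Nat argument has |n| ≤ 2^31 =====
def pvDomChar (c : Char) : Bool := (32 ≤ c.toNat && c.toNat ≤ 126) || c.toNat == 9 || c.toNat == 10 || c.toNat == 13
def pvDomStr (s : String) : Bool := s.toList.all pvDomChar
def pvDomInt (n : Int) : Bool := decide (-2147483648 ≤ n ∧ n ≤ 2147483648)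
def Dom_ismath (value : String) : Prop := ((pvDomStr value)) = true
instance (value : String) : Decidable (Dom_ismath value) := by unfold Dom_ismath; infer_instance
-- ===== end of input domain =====

-- B replaces A's single stateful depth-tracking scan by a stateless existence test:
-- for each operator position, compare prefix counts of open and close braces (objective: alternative).


-- ===== PORT A =====
-- A's loop: mutable depth, update on '{'/'}', inline early return on a depth-0 operator.
def ismathGo : List Char → Int → Bool
  | [], _ => false
  | c :: rest, depth =>
    let depth' : Int := if c = '{' then depth + 1 else if c = '}' then depth - 1 else depth
    if depth' == 0 && (['+', '-', '*', '/', '%', '&'].contains c) then true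
    else ismathGo rest depth'

def ismath (value : String) : Bool := ismathGo value.toList 0

-- ===== PORT B =====
-- any(value.count('{',0,i) == value.count('}',0,i) for i, c in enumerate(value) if c in '+-*/%&')
def ismath_alt (value : String) : Bool :=
  let l := value.toList
  (List.range l.length).any (fun i =>
    (['+', '-', '*', '/', '%', '&'].contains (l.getD i ' ')) &&
    ((l.take i).count '{' == (l.take i).count '}'))

-- ===== PRECONDITION & SPEC =====
def Spec_ismath (value : String) (out : Bool) : Prop := out = ismath_alt value
instance (value : String) (out : Bool) : Decidable (Spec_ismath value out) := by unfold Spec_ismath; infer_instance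

-- ===== CLAIM (what is proved, stated in full; the proofs are below) =====
def Claim_equal_ismath : Prop := ∀ (value : String), Dom_ismath value → Spec_ismath value (ismath value)

-- ===== LEMMAS AND PROOFS =====
-- proof helper: A's loop with the operator test pulled before the (op-irrelevant) depth update
def gScan : List Char → Int → Bool
  | [], _ => false
  | c :: rest, d =>
    ((['+', '-', '*', '/', '%', '&'].contains c) && d == 0) ||
      gScan rest (if c = '{' then d + 1 else if c = '}' then d - 1 else d)

theorem ismathGo_eq_gScan (l : List Char) (d : Int) : ismathGo l d = gScan l d := by
  induction l generalizing d with
  | nil => rfl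
  | cons c rest ih =>
    by_cases h1 : c = '{'
    · subst h1; simp [ismathGo, gScan, ih]
    · by_cases h2 : c = '}'
      · subst h2; simp [ismathGo, gScan, ih, h1]
      · by_cases hd0 : d = 0 <;> simp [ismathGo, gScan, h1, h2, ih, hd0, Bool.and_comm]

theorem gScan_eq_counts (l pre : List Char) :
    gScan l ((pre.count '{' : Int) - (pre.count '}' : Int)) =
      (List.range l.length).any (fun i =>
        (['+', '-', '*', '/', '%', '&'].contains (l.getD i ' ')) &&
        (((pre ++ l.take i).count '{') == ((pre ++ l.take i).count '}'))) := by
  induction l generalizing pre with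
  | nil => rfl
  | cons c rest ih =>
    have hd : (if c = '{' then ((pre.count '{' : Int) - (pre.count '}' : Int)) + 1
          else if c = '}' then ((pre.count '{' : Int) - (pre.count '}' : Int)) - 1
          else ((pre.count '{' : Int) - (pre.count '}' : Int)))
        = (((pre ++ [c]).count '{' : Int) - ((pre ++ [c]).count '}' : Int)) := by
      split_ifs with h1 h2
      · simp [List.count_append, h1]; omega
      · simp [List.count_append, h2]; omega
      · simp [List.count_append, h1, h2]
    have hz : ((((pre.count '{' : Nat) : Int) - ((pre.count '}' : Nat) : Int)) == 0)
        = ((pre.count '{' : Nat) == (pre.count '}' : Nat)) := by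
      by_cases h : (pre.count '{' : Nat) = pre.count '}' <;> simp [h] <;> omega
    have e : gScan (c :: rest) ((pre.count '{' : Int) - (pre.count '}' : Int)) =
        (((['+', '-', '*', '/', '%', '&'].contains c) &&
          (((pre.count '{' : Int) - (pre.count '}' : Int)) == 0)) ||
        gScan rest (if c = '{' then ((pre.count '{' : Int) - (pre.count '}' : Int)) + 1
          else if c = '}' then ((pre.count '{' : Int) - (pre.count '}' : Int)) - 1
          else ((pre.count '{' : Int) - (pre.count '}' : Int)))) := rfl
    rw [e, hd, hz, ih (pre ++ [c])]
    simp only [List.length_cons, List.range_succ_eq_map, List.any_cons, List.any_map]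
    congr 1
    · simp
    · congr 1
      funext i
      simp [Function.comp, List.take_succ_cons, List.append_assoc]

-- ===== VERDICT (by name: the statement is the Claim_ definition above) =====
theorem ismath_spec : Claim_equal_ismath := by
  intro value _
  unfold Spec_ismath ismath ismath_alt
  rw [ismathGo_eq_gScan]
  have h := gScan_eq_counts value.toList []
  simpa using h
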